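-- pv_equiv track=rewrite | github.com/AbhayShuklaIIT/Legal_NER | NER/utility_ner.py | remove_annotator_added_nes
-- ===== SOURCE A (Python) =====
-- def remove_annotator_added_nes(n, c, r, s, f):
--     n_n, c_n, r_n, s_n, f_n = [], [], [], [], []
--     n_n_a, c_n_a, r_n_a, s_n_a, f_n_a = [], [], [], [], []
--     for i in range(len(n)):
--         if f[i]=="":
--             n_n_a.append(n[i])
--             c_n_a.append(c[i])
--             r_n_a.append(r[i])
--             s_n_a.append(s[i])
--             f_n_a.append(f[i])
--         else:
--             n_n.append(n[i])
--             c_n.append(c[i])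
--             r_n.append(r[i])
--             s_n.append(s[i])
--             f_n.append(f[i])
--     return n_n, c_n, r_n, s_n, f_n, n_n_a, c_n_a, r_n_a, s_n_a, f_n_a
-- ===== SOURCE B (Python) =====
-- def remove_annotator_added_nes(n, c, r, s, f):
--     # Compute the stable partition of positions once, then gather every column
--     # independently (column-major), instead of one row-major loop feeding ten lists.
--     kept_idx = [i for i in range(len(n)) if f[i] != ""]
--     added_idx = [i for i in range(len(n)) if f[i] == ""]
--     def gather(col, idx):
--         return [col[i] for i in idx]
--     return (gather(n, kept_idx), gather(c, kept_idx), gather(r, kept_idx),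
--             gather(s, kept_idx), gather(f, kept_idx),
--             gather(n, added_idx), gather(c, added_idx), gather(r, added_idx),
--             gather(s, added_idx), gather(f, added_idx))
-- ===== Notes on version B (the rewrite author's own statement) =====
-- stated objective: alternative
-- what changed: B first computes the two index lists of the stable partition of positions by the empty-flag test, then gathers each of the five columns independently from those index lists (column-major, an index-indirection pass per output list), instead of A's single row-major loop appending in lockstep to ten accumulator lists.
import Mathlib
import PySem

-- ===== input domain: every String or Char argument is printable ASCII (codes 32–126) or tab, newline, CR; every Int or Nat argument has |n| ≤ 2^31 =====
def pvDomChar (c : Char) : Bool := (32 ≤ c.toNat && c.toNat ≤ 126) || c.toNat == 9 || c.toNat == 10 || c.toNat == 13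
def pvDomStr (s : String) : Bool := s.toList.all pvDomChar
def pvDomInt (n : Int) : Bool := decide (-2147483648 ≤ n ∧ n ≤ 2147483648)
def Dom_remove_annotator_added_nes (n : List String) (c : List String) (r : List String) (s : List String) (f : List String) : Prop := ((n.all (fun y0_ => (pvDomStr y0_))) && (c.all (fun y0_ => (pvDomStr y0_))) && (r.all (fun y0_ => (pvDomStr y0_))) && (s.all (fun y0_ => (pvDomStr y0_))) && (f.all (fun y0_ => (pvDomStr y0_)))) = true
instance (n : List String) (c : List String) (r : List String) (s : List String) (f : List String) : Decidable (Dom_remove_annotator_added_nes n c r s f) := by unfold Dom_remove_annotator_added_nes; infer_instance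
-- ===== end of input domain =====

-- B precomputes the stable index partition by the empty-flag test and then gathers each
-- column independently, instead of A's row-major loop over ten accumulators (alternative; same cost).

-- ===== PORT A =====
-- literal transliteration of A's index loop: ten accumulators, appends, f[i]=="" test first
def remove_annotator_added_nes (n : List String) (c : List String) (r : List String) (s : List String) (f : List String) : List String × List String × List String × List String × List String × List String × List String × List String × List String × List String :=
  (PySem.List.pyRange 0 (n.length : Int) 1).foldl
    (fun acc i =>
      if PySem.List.pyGetD f i "" = "" then
        (acc.1, acc.2.1, acc.2.2.1, acc.2.2.2.1, acc.2.2.2.2.1,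
         acc.2.2.2.2.2.1 ++ [PySem.List.pyGetD n i ""],
         acc.2.2.2.2.2.2.1 ++ [PySem.List.pyGetD c i ""],
         acc.2.2.2.2.2.2.2.1 ++ [PySem.List.pyGetD r i ""],
         acc.2.2.2.2.2.2.2.2.1 ++ [PySem.List.pyGetD s i ""],
         acc.2.2.2.2.2.2.2.2.2 ++ [PySem.List.pyGetD f i ""])
      else
        (acc.1 ++ [PySem.List.pyGetD n i ""],
         acc.2.1 ++ [PySem.List.pyGetD c i ""],
         acc.2.2.1 ++ [PySem.List.pyGetD r i ""],
         acc.2.2.2.1 ++ [PySem.List.pyGetD s i ""],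
         acc.2.2.2.2.1 ++ [PySem.List.pyGetD f i ""],
         acc.2.2.2.2.2.1, acc.2.2.2.2.2.2.1, acc.2.2.2.2.2.2.2.1,
         acc.2.2.2.2.2.2.2.2.1, acc.2.2.2.2.2.2.2.2.2))
    ([], [], [], [], [], [], [], [], [], [])

-- ===== PORT B =====
-- gather(col, idx) = [col[i] for i in idx]
def pvGather (col : List String) (idx : List Int) : List String :=
  idx.map (fun i => PySem.List.pyGetD col i "")

-- transliteration of Source B: kept/added index lists of the partition, then ten gathers
def remove_annotator_added_nes_alt (n : List String) (c : List String) (r : List String) (s : List String) (f : List String) : List String × List String × List String × List String × List String × List String × List String × List String × List String × List String :=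
  let keptIdx := (PySem.List.pyRange 0 (n.length : Int) 1).filter (fun i => !(PySem.List.pyGetD f i "" = ""))
  let addedIdx := (PySem.List.pyRange 0 (n.length : Int) 1).filter (fun i => PySem.List.pyGetD f i "" = "")
  (pvGather n keptIdx, pvGather c keptIdx, pvGather r keptIdx, pvGather s keptIdx, pvGather f keptIdx,
   pvGather n addedIdx, pvGather c addedIdx, pvGather r addedIdx, pvGather s addedIdx, pvGather f addedIdx)

-- ===== PRECONDITION & SPEC =====
-- Pre_ excludes only the inputs where A raises IndexError: some of c, r, s, f shorter than n.
def Pre_remove_annotator_added_nes (n : List String) (c : List String) (r : List String) (s : List String) (f : List String) : Prop :=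
  n.length ≤ c.length ∧ n.length ≤ r.length ∧ n.length ≤ s.length ∧ n.length ≤ f.length
instance (n : List String) (c : List String) (r : List String) (s : List String) (f : List String) : Decidable (Pre_remove_annotator_added_nes n c r s f) := by unfold Pre_remove_annotator_added_nes; infer_instance

def pvWitness_remove_annotator_added_nes : List String × List String × List String × List String × List String :=
  (["a", "b"], ["1", "2"], ["x", "y"], ["p", "q"], ["", "F"])

-- DecidableEq for the 10-tuple, built in small steps (instance search alone exceeds its size limit)
def pvDecEq2 : DecidableEq (List String × List String) := instDecidableEqProd
def pvDecEq3 : DecidableEq (List String × List String × List String) := @instDecidableEqProd _ _ _ pvDecEq2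
def pvDecEq4 : DecidableEq (List String × List String × List String × List String) := @instDecidableEqProd _ _ _ pvDecEq3
def pvDecEq5 : DecidableEq (List String × List String × List String × List String × List String) := @instDecidableEqProd _ _ _ pvDecEq4
def pvDecEq6 : DecidableEq (List String × List String × List String × List String × List String × List String) := @instDecidableEqProd _ _ _ pvDecEq5
def pvDecEq7 : DecidableEq (List String × List String × List String × List String × List String × List String × List String) := @instDecidableEqProd _ _ _ pvDecEq6
def pvDecEq8 : DecidableEq (List String × List String × List String × List String × List String × List String × List String × List String) := @instDecidableEqProd _ _ _ pvDecEq7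
def pvDecEq9 : DecidableEq (List String × List String × List String × List String × List String × List String × List String × List String × List String) := @instDecidableEqProd _ _ _ pvDecEq8
def pvDecEq10 : DecidableEq (List String × List String × List String × List String × List String × List String × List String × List String × List String × List String) := @instDecidableEqProd _ _ _ pvDecEq9

def Spec_remove_annotator_added_nes (n : List String) (c : List String) (r : List String) (s : List String) (f : List String) (out : List String × List String × List String × List String × List String × List String × List String × List String × List String × List String) : Prop := out = remove_annotator_added_nes_alt n c r s f
instance (n : List String) (c : List String) (r : List String) (s : List String) (f : List String) (out : List String × List String × List String × List String × List String × List String × List String × List String × List String × List String) : Decidable (Spec_remove_annotator_added_nes n c r s f out) := by unfold Spec_remove_annotator_added_nes; exact pvDecEq10 _ _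

-- ===== CLAIM (what is proved, stated in full; the proofs are below) =====
def Claim_equal_remove_annotator_added_nes : Prop := ∀ (n : List String) (c : List String) (r : List String) (s : List String) (f : List String), Dom_remove_annotator_added_nes n c r s f → Pre_remove_annotator_added_nes n c r s f → Spec_remove_annotator_added_nes n c r s f (remove_annotator_added_nes n c r s f)

-- ===== LEMMAS AND PROOFS =====

-- A's fold over any index list equals appending the gathers of the two filtered index lists
lemma pvFoldIdx (n c r s f : List String) (L : List Int) :
    ∀ (a1 a2 a3 a4 a5 a6 a7 a8 a9 a10 : List String),
    L.foldl
      (fun acc i =>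
        if PySem.List.pyGetD f i "" = "" then
          (acc.1, acc.2.1, acc.2.2.1, acc.2.2.2.1, acc.2.2.2.2.1,
           acc.2.2.2.2.2.1 ++ [PySem.List.pyGetD n i ""],
           acc.2.2.2.2.2.2.1 ++ [PySem.List.pyGetD c i ""],
           acc.2.2.2.2.2.2.2.1 ++ [PySem.List.pyGetD r i ""],
           acc.2.2.2.2.2.2.2.2.1 ++ [PySem.List.pyGetD s i ""],
           acc.2.2.2.2.2.2.2.2.2 ++ [PySem.List.pyGetD f i ""])
        else
          (acc.1 ++ [PySem.List.pyGetD n i ""],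
           acc.2.1 ++ [PySem.List.pyGetD c i ""],
           acc.2.2.1 ++ [PySem.List.pyGetD r i ""],
           acc.2.2.2.1 ++ [PySem.List.pyGetD s i ""],
           acc.2.2.2.2.1 ++ [PySem.List.pyGetD f i ""],
           acc.2.2.2.2.2.1, acc.2.2.2.2.2.2.1, acc.2.2.2.2.2.2.2.1,
           acc.2.2.2.2.2.2.2.2.1, acc.2.2.2.2.2.2.2.2.2))
      (a1, a2, a3, a4, a5, a6, a7, a8, a9, a10) =
      (a1 ++ pvGather n (L.filter (fun i => !(PySem.List.pyGetD f i "" = ""))),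
       a2 ++ pvGather c (L.filter (fun i => !(PySem.List.pyGetD f i "" = ""))),
       a3 ++ pvGather r (L.filter (fun i => !(PySem.List.pyGetD f i "" = ""))),
       a4 ++ pvGather s (L.filter (fun i => !(PySem.List.pyGetD f i "" = ""))),
       a5 ++ pvGather f (L.filter (fun i => !(PySem.List.pyGetD f i "" = ""))),
       a6 ++ pvGather n (L.filter (fun i => PySem.List.pyGetD f i "" = "")),
       a7 ++ pvGather c (L.filter (fun i => PySem.List.pyGetD f i "" = "")),
       a8 ++ pvGather r (L.filter (fun i => PySem.List.pyGetD f i "" = "")),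
       a9 ++ pvGather s (L.filter (fun i => PySem.List.pyGetD f i "" = "")),
       a10 ++ pvGather f (L.filter (fun i => PySem.List.pyGetD f i "" = ""))) := by
  induction L with
  | nil => intro a1 a2 a3 a4 a5 a6 a7 a8 a9 a10; simp [pvGather]
  | cons z L ih =>
    intro a1 a2 a3 a4 a5 a6 a7 a8 a9 a10
    by_cases h : PySem.List.pyGetD f z "" = "" <;>
      simp [List.foldl_cons, h, ih, pvGather]

theorem remove_annotator_added_nes_spec : Claim_equal_remove_annotator_added_nes := by
  intro n c r s f _ _
  unfold Spec_remove_annotator_added_nes remove_annotator_added_nes remove_annotator_added_nes_alt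
  rw [pvFoldIdx]
  simp
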